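-- pv_equiv track=rewrite | github.com/vanallenlab/unexplained_familial_cancer | scripts/figure_creation/Figure1/make_patient_heatmap.v9.py | clean_label
-- ===== SOURCE A (Python) =====
-- def clean_label(x):
--     x = str(x).capitalize()
--     replacements = {
--         "Basal_cell": "BCC",
--         "Squamous_cell": "SCC",
--         "Non-hodgkin": "NHL",
--         "Neuroendocrine": "NETs",
--         "Blood_soft_tissue": "B & ST"
--     }
--     for k,v in replacements.items():
--         x = x.replace(k, v)
--     x = x.replace("_", " ")
--     return x#.title()
-- ===== SOURCE B (Python) =====
-- def clean_label(x):
--     x = str(x).capitalize()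
--     replacements = {
--         "Basal_cell": "BCC",
--         "Squamous_cell": "SCC",
--         "Non-hodgkin": "NHL",
--         "Neuroendocrine": "NETs",
--         "Blood_soft_tissue": "B & ST"
--     }
--     # After capitalize() every key (which starts with an uppercase letter)
--     # can only match at position 0, and at most one key can match there.
--     for k, v in replacements.items():
--         if x.startswith(k):
--             x = v + x[len(k):]
--             break
--     return "".join(" " if c == "_" else c for c in x)
-- ===== Notes on version B (the rewrite author's own statement) =====
-- stated objective: idiomatic
-- what changed: The five sequential full-string .replace passes are replaced by a single prefix check per key (after capitalize() every key, starting with an uppercase letter, can only match at position 0, and at most one key can match) and the final underscore replace becomes one character-map pass.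
import Mathlib
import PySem

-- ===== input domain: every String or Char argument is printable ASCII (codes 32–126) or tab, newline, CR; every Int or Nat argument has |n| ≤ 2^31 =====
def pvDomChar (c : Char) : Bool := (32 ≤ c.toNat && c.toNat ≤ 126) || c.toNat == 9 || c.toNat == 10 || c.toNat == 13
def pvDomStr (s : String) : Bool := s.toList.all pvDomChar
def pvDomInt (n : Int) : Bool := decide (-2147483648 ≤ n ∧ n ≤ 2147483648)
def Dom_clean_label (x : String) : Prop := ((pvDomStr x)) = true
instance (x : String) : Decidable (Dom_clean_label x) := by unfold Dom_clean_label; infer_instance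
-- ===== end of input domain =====

-- B replaces A's five sequential full-string .replace passes by a single prefix check
-- (after capitalize() a key can only match at position 0) plus one char-map pass for '_'.

-- str.capitalize(): first char uppercased, the rest lowercased (exact on the ASCII domain)
def pyCapitalize : List Char → List Char
  | [] => []
  | c :: t => PySem.Chars.upperChar c :: t.map PySem.Chars.lowerChar

-- the `replacements` dict literal both programs build (insertion order)
def labelReps : List (List Char × List Char) :=
  [("Basal_cell".toList, "BCC".toList),
   ("Squamous_cell".toList, "SCC".toList),
   ("Non-hodgkin".toList, "NHL".toList),
   ("Neuroendocrine".toList, "NETs".toList),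
   ("Blood_soft_tissue".toList, "B & ST".toList)]

-- ===== PORT A =====
def clean_label (x : String) : String :=
  let x1 := pyCapitalize x.toList
  let x2 := labelReps.foldl (fun s kv => PySem.Chars.replace s kv.1 kv.2) x1
  String.mk (PySem.Chars.replace x2 ['_'] [' '])

-- ===== PORT B =====
-- B's loop: first key that is a PREFIX of x replaces that prefix, then break
def applyPrefixRep : List (List Char × List Char) → List Char → List Char
  | [], s => s
  | (k, v) :: rest, s =>
    if PySem.Chars.startswith s k then v ++ s.drop k.length else applyPrefixRep rest s

def clean_label_alt (x : String) : String :=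
  let x1 := pyCapitalize x.toList
  let x2 := applyPrefixRep labelReps x1
  String.mk (x2.map (fun c => if c = '_' then ' ' else c))

-- ===== PRECONDITION & SPEC =====
def Spec_clean_label (x : String) (out : String) : Prop := out = clean_label_alt x
instance (x : String) (out : String) : Decidable (Spec_clean_label x out) := by unfold Spec_clean_label; infer_instance

-- ===== CLAIM (what is proved, stated in full; the proofs are below) =====
def Claim_equal_clean_label : Prop := ∀ (x : String), Dom_clean_label x → Spec_clean_label x (clean_label x)

-- ===== LEMMAS AND PROOFS =====

-- replace.go over a haystack that never contains the needle's first char: identity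
theorem go_no_occ (h0 : Char) (kt v : List Char) :
    ∀ (l : List Char) (acc : List Char) (fuel : Nat), l.length ≤ fuel → h0 ∉ l →
    PySem.Chars.replace.go (h0 :: kt) v fuel l acc = acc.reverse ++ l
  | [], acc, fuel, _, _ => by
      rw [PySem.Chars.replace.go.eq_def]
      cases fuel <;> simp
  | c :: t, acc, fuel + 1, hf, hm => by
      rw [PySem.Chars.replace.go.eq_def]
      have hne : (h0 :: kt).isPrefixOf (c :: t) = false := by
        rw [Bool.eq_false_iff]
        intro hpre
        exact hm (List.IsPrefix.mem (List.mem_cons_self ..) (List.isPrefixOf_iff_prefix.1 hpre))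
      simp only [hne, Bool.false_eq_true, if_false]
      rw [go_no_occ h0 kt v t (c :: acc) fuel (by simpa using hf)
        (fun h => hm (List.mem_cons_of_mem _ h))]
      simp

-- replace.go with a single-char needle and single-char replacement is a map
theorem go_single (a b : Char) :
    ∀ (l : List Char) (acc : List Char) (fuel : Nat), l.length ≤ fuel →
    PySem.Chars.replace.go [a] [b] fuel l acc
      = acc.reverse ++ l.map (fun c => if c = a then b else c)
  | [], acc, fuel, _ => by
      rw [PySem.Chars.replace.go.eq_def]
      cases fuel <;> simp
  | c :: t, acc, fuel + 1, hf => by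
      rw [PySem.Chars.replace.go.eq_def]
      simp only [List.isPrefixOf]
      by_cases hc : c = a
      · simp only [hc, BEq.rfl, Bool.true_and, if_true, List.length_cons, List.length_nil,
          List.drop_succ_cons, List.drop_zero]
        rw [go_single a b t ([b].reverse ++ acc) fuel (by simpa using hf)]
        simp
      · have hab : (a == c) = false := by simp; exact fun h => hc h.symm
        simp only [hab, Bool.false_and, Bool.false_eq_true, if_false]
        rw [go_single a b t (c :: acc) fuel (by simpa using hf)]
        simp [hc]

theorem replace_no_occ (h0 : Char) (kt v l : List Char) (hm : h0 ∉ l) :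
    PySem.Chars.replace l (h0 :: kt) v = l := by
  rw [PySem.Chars.replace]
  simp only [List.isEmpty_cons, Bool.false_eq_true, if_false]
  rw [go_no_occ h0 kt v l [] l.length le_rfl hm]
  simp

-- when the needle's first char occurs nowhere in the tail, replace only acts on the prefix
theorem replace_prefix_only (h0 : Char) (kt v : List Char) (c : Char) (t : List Char)
    (hm : h0 ∉ t) :
    PySem.Chars.replace (c :: t) (h0 :: kt) v
      = if (h0 :: kt).isPrefixOf (c :: t) then v ++ t.drop kt.length else c :: t := by
  rw [PySem.Chars.replace]
  simp only [List.isEmpty_cons, Bool.false_eq_true, if_false]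
  by_cases hp : (h0 :: kt).isPrefixOf (c :: t)
  · simp only [hp, if_true]
    rw [PySem.Chars.replace.go.eq_def]
    simp only [List.length_cons, hp, if_true, List.drop_succ_cons]
    rw [go_no_occ h0 kt v (t.drop kt.length) (v.reverse ++ []) t.length
      (by simpa using List.length_drop_le ..) (fun h => hm (List.mem_of_mem_drop h))]
    simp
  · simp only [hp, Bool.false_eq_true, if_false]
    rw [PySem.Chars.replace.go.eq_def]
    simp only [List.length_cons, hp, Bool.false_eq_true, if_false]
    rw [go_no_occ h0 kt v t [c] t.length le_rfl hm]
    simp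

theorem replace_hit (h0 : Char) (kt v : List Char) (c : Char) (t : List Char) (hm : h0 ∉ t)
    (hp : List.isPrefixOf (h0 :: kt) (c :: t) = true) :
    PySem.Chars.replace (c :: t) (h0 :: kt) v = v ++ t.drop kt.length := by
  rw [replace_prefix_only h0 kt v c t hm, if_pos hp]

theorem replace_miss (h0 : Char) (kt v : List Char) (c : Char) (t : List Char) (hm : h0 ∉ t)
    (hp : List.isPrefixOf (h0 :: kt) (c :: t) = false) :
    PySem.Chars.replace (c :: t) (h0 :: kt) v = c :: t := by
  rw [replace_prefix_only h0 kt v c t hm, hp]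
  simp

theorem replace_single (a b : Char) (l : List Char) :
    PySem.Chars.replace l [a] [b] = l.map (fun c => if c = a then b else c) := by
  rw [PySem.Chars.replace]
  simp only [List.isEmpty_cons, Bool.false_eq_true, if_false]
  rw [go_single a b l [] l.length le_rfl]
  simp

-- lowercased chars are never one of the keys' (uppercase) first letters
theorem lowerChar_notBSN (c : Char) :
    PySem.Chars.lowerChar c ≠ 'B' ∧ PySem.Chars.lowerChar c ≠ 'S' ∧
      PySem.Chars.lowerChar c ≠ 'N' := by
  unfold PySem.Chars.lowerChar
  by_cases h : PySem.Chars.isupper c = true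
  · simp only [h, if_true]
    have h1 : 65 ≤ c.toNat ∧ c.toNat ≤ 90 := by
      unfold PySem.Chars.isupper at h
      simp only [Bool.and_eq_true, decide_eq_true_eq, Char.le_def] at h
      exact ⟨UInt32.le_iff_toNat_le.mp h.1, UInt32.le_iff_toNat_le.mp h.2⟩
    have ht : (Char.ofNat (c.toNat + 32)).toNat = c.toNat + 32 := by
      rw [Char.toNat_ofNat, if_pos (Or.inl (by omega))]
    refine ⟨?_, ?_, ?_⟩ <;> (intro he; rw [he] at ht)
    · have : ('B' : Char).toNat = 66 := rfl
      omega
    · have : ('S' : Char).toNat = 83 := rfl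
      omega
    · have : ('N' : Char).toNat = 78 := rfl
      omega
  · rw [Bool.not_eq_true] at h
    simp only [h, Bool.false_eq_true, if_false]
    refine ⟨?_, ?_, ?_⟩ <;> (intro he; rw [he] at h; exact absurd h (by decide))

theorem not_mem_map_lower (t : List Char) (u : Char)
    (hu : ∀ c, PySem.Chars.lowerChar c ≠ u) : u ∉ t.map PySem.Chars.lowerChar := by
  intro h
  obtain ⟨d, _, hd⟩ := List.mem_map.mp h
  exact hu d hd

-- ===== VERDICT (by name: the statement is the Claim_ definition above) =====
theorem clean_label_spec : Claim_equal_clean_label := by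
  intro x _
  unfold Spec_clean_label clean_label clean_label_alt
  cases hx : x.toList with
  | nil => decide
  | cons c t =>
    simp only [pyCapitalize]
    have hB : 'B' ∉ t.map PySem.Chars.lowerChar :=
      not_mem_map_lower t 'B' (fun d => (lowerChar_notBSN d).1)
    have hS : 'S' ∉ t.map PySem.Chars.lowerChar :=
      not_mem_map_lower t 'S' (fun d => (lowerChar_notBSN d).2.1)
    have hN : 'N' ∉ t.map PySem.Chars.lowerChar :=
      not_mem_map_lower t 'N' (fun d => (lowerChar_notBSN d).2.2)
    set u := PySem.Chars.upperChar c with hu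
    set T := t.map PySem.Chars.lowerChar with hT
    simp only [labelReps, List.foldl_cons, List.foldl_nil, applyPrefixRep,
      PySem.Chars.startswith,
      show "Basal_cell".toList = ['B','a','s','a','l','_','c','e','l','l'] from rfl,
      show "Squamous_cell".toList = ['S','q','u','a','m','o','u','s','_','c','e','l','l'] from rfl,
      show "Non-hodgkin".toList = ['N','o','n','-','h','o','d','g','k','i','n'] from rfl,
      show "Neuroendocrine".toList = ['N','e','u','r','o','e','n','d','o','c','r','i','n','e'] from rfl,
      show "Blood_soft_tissue".toList = ['B','l','o','o','d','_','s','o','f','t','_','t','i','s','s','u','e'] from rfl,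
      show "BCC".toList = ['B','C','C'] from rfl,
      show "SCC".toList = ['S','C','C'] from rfl,
      show "NHL".toList = ['N','H','L'] from rfl,
      show "NETs".toList = ['N','E','T','s'] from rfl,
      show "B & ST".toList = ['B',' ','&',' ','S','T'] from rfl]
    by_cases h1 : List.isPrefixOf ['B','a','s','a','l','_','c','e','l','l'] (u :: T) = true
    · rw [replace_hit 'B' _ _ _ _ hB h1]
      simp only [List.length_cons, List.length_nil, List.cons_append, List.nil_append]
      rw [replace_no_occ 'S' _ _ ('B'::'C'::'C'::T.drop 9)
        (by simp; exact fun h => hS (List.mem_of_mem_drop h))]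
      rw [replace_no_occ 'N' ['o','n','-','h','o','d','g','k','i','n'] _ ('B'::'C'::'C'::T.drop 9)
        (by simp; exact fun h => hN (List.mem_of_mem_drop h))]
      rw [replace_no_occ 'N' ['e','u','r','o','e','n','d','o','c','r','i','n','e'] _ ('B'::'C'::'C'::T.drop 9)
        (by simp; exact fun h => hN (List.mem_of_mem_drop h))]
      rw [replace_miss 'B' _ _ 'B' ('C'::'C'::T.drop 9)
        (by simp; exact fun h => hB (List.mem_of_mem_drop h))
        (by simp [List.isPrefixOf])]
      rw [replace_single, if_pos h1]
      simp
    · rw [Bool.not_eq_true] at h1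
      rw [replace_miss 'B' _ _ u T hB h1]
      simp only [h1, Bool.false_eq_true, if_false]
      by_cases h2 : List.isPrefixOf ['S','q','u','a','m','o','u','s','_','c','e','l','l'] (u :: T) = true
      · rw [replace_hit 'S' _ _ _ _ hS h2]
        simp only [List.length_cons, List.length_nil, List.cons_append, List.nil_append]
        rw [replace_no_occ 'N' ['o','n','-','h','o','d','g','k','i','n'] _ ('S'::'C'::'C'::T.drop 12)
          (by simp; exact fun h => hN (List.mem_of_mem_drop h))]
        rw [replace_no_occ 'N' ['e','u','r','o','e','n','d','o','c','r','i','n','e'] _ ('S'::'C'::'C'::T.drop 12)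
          (by simp; exact fun h => hN (List.mem_of_mem_drop h))]
        rw [replace_no_occ 'B' _ _ ('S'::'C'::'C'::T.drop 12)
          (by simp; exact fun h => hB (List.mem_of_mem_drop h))]
        rw [replace_single, if_pos h2]
        simp
      · rw [Bool.not_eq_true] at h2
        rw [replace_miss 'S' _ _ u T hS h2]
        simp only [h2, Bool.false_eq_true, if_false]
        by_cases h3 : List.isPrefixOf ['N','o','n','-','h','o','d','g','k','i','n'] (u :: T) = true
        · rw [replace_hit 'N' _ _ _ _ hN h3]
          simp only [List.length_cons, List.length_nil, List.cons_append, List.nil_append]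
          rw [replace_miss 'N' ['e','u','r','o','e','n','d','o','c','r','i','n','e'] _ 'N' ('H'::'L'::T.drop 10)
            (by simp; exact fun h => hN (List.mem_of_mem_drop h))
            (by simp [List.isPrefixOf])]
          rw [replace_no_occ 'B' _ _ ('N'::'H'::'L'::T.drop 10)
            (by simp; exact fun h => hB (List.mem_of_mem_drop h))]
          rw [replace_single, if_pos h3]
          simp
        · rw [Bool.not_eq_true] at h3
          rw [replace_miss 'N' ['o','n','-','h','o','d','g','k','i','n'] _ u T hN h3]
          simp only [h3, Bool.false_eq_true, if_false]
          by_cases h4 : List.isPrefixOf ['N','e','u','r','o','e','n','d','o','c','r','i','n','e'] (u :: T) = true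
          · rw [replace_hit 'N' _ _ _ _ hN h4]
            simp only [List.length_cons, List.length_nil, List.cons_append, List.nil_append]
            rw [replace_no_occ 'B' _ _ ('N'::'E'::'T'::'s'::T.drop 13)
              (by simp; exact fun h => hB (List.mem_of_mem_drop h))]
            rw [replace_single, if_pos h4]
            simp
          · rw [Bool.not_eq_true] at h4
            rw [replace_miss 'N' ['e','u','r','o','e','n','d','o','c','r','i','n','e'] _ u T hN h4]
            simp only [h4, Bool.false_eq_true, if_false]
            by_cases h5 : List.isPrefixOf ['B','l','o','o','d','_','s','o','f','t','_','t','i','s','s','u','e'] (u :: T) = true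
            · rw [replace_hit 'B' _ _ _ _ hB h5]
              simp only [List.length_cons, List.length_nil, List.cons_append, List.nil_append]
              rw [replace_single, if_pos h5]
              simp
            · rw [Bool.not_eq_true] at h5
              rw [replace_miss 'B' _ _ u T hB h5]
              simp only [h5, Bool.false_eq_true, if_false]
              rw [replace_single]
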